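-- pv_equiv track=rewrite | github.com/WangSbox/svmface | lib/mmetric.py | perf_measure
-- ===== SOURCE A (Python) =====
-- def perf_measure(y_true, y_pred, threshold):
--     TP, FP, TN, FN = 0, 0, 0, 0
--     for i in range(len(y_true)):
--         if y_true[i] == 1 and y_pred[i] == 1:            TP += 1
--         if y_true[i] == 0 and y_pred[i] == 1:            FP += 1
--         if y_true[i] == 0 and y_pred[i] == 0:            TN += 1
--         if y_true[i] == 1 and y_pred[i] == 0:            FN += 1
--     return TP, FP, TN, FN
-- ===== SOURCE B (Python) =====
-- def perf_measure(y_true, y_pred, threshold):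
--     pairs = [(y_true[i], y_pred[i]) for i in range(len(y_true))]
--     return (pairs.count((1, 1)), pairs.count((0, 1)),
--             pairs.count((0, 0)), pairs.count((1, 0)))
-- ===== Notes on version B (the rewrite author's own statement) =====
-- stated objective: idiomatic
-- what changed: A's single loop with four per-element equality branches updating four counters is replaced by materialising the list of (true, pred) pairs once and then taking list.count of each of the four confusion-matrix cells (one map pass plus four scans).
-- outside the precondition, e.g. on perf_measure([0, -3, 5], [2, 0], 3): A returns (0, 0, 0, 0), B raises IndexError
import Mathlib
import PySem

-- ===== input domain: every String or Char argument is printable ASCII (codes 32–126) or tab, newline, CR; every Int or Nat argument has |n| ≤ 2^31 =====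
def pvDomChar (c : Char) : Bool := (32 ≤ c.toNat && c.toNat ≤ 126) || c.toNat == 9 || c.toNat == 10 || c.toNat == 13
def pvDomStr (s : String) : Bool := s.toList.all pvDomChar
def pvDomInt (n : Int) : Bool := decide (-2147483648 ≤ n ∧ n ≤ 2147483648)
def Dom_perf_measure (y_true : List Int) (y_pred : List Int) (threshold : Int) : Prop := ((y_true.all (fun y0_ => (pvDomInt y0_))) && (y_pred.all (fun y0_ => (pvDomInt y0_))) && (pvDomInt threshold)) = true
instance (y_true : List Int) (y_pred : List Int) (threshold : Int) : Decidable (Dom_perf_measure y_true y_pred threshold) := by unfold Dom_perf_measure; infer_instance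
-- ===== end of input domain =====

-- B replaces A's loop with four per-element branches by materialising the (true, pred) pair list
-- once and reading off each confusion-matrix cell with list.count (idiomatic; same cost).

-- ===== PORT A =====
-- the loop body of A: four independent `if`s updating (TP, FP, TN, FN)
def pvStepA (y_true : List Int) (y_pred : List Int)
    (st : Int × Int × Int × Int) (i : Int) : Int × Int × Int × Int :=
  let t := PySem.List.pyGetD y_true i 0   -- in-range under Pre_ (i < len y_true)
  let p := PySem.List.pyGetD y_pred i 0   -- in-range under Pre_ (len y_true ≤ len y_pred)
  let st := if t = 1 ∧ p = 1 then (st.1 + 1, st.2.1, st.2.2.1, st.2.2.2) else st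
  let st := if t = 0 ∧ p = 1 then (st.1, st.2.1 + 1, st.2.2.1, st.2.2.2) else st
  let st := if t = 0 ∧ p = 0 then (st.1, st.2.1, st.2.2.1 + 1, st.2.2.2) else st
  let st := if t = 1 ∧ p = 0 then (st.1, st.2.1, st.2.2.1, st.2.2.2 + 1) else st
  st

def perf_measure (y_true : List Int) (y_pred : List Int) (threshold : Int) : Int × Int × Int × Int :=
  (PySem.List.pyRange 0 (y_true.length : Int) 1).foldl (pvStepA y_true y_pred) (0, 0, 0, 0)

-- ===== PORT B =====
def perf_measure_alt (y_true : List Int) (y_pred : List Int) (threshold : Int) : Int × Int × Int × Int :=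
  let pairs := (PySem.List.pyRange 0 (y_true.length : Int) 1).map
    (fun i => (PySem.List.pyGetD y_true i 0, PySem.List.pyGetD y_pred i 0))
  (PySem.List.count pairs (1, 1), PySem.List.count pairs (0, 1),
   PySem.List.count pairs (0, 0), PySem.List.count pairs (1, 0))

-- ===== PRECONDITION & SPEC =====
-- Pre_ excludes inputs with y_pred shorter than y_true: there B raises IndexError, and A either raises
-- too or returns only because `and` short-circuits past y_pred[i] when y_true[i] is not 0 or 1.
def Pre_perf_measure (y_true : List Int) (y_pred : List Int) (threshold : Int) : Prop :=
  y_true.length ≤ y_pred.length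
instance (y_true : List Int) (y_pred : List Int) (threshold : Int) : Decidable (Pre_perf_measure y_true y_pred threshold) := by unfold Pre_perf_measure; infer_instance

def pvWitness_perf_measure : List Int × List Int × Int := ([1, 0, 1, 2], [1, 1, 0, 0], 0)

def Spec_perf_measure (y_true : List Int) (y_pred : List Int) (threshold : Int) (out : Int × Int × Int × Int) : Prop := out = perf_measure_alt y_true y_pred threshold
instance (y_true : List Int) (y_pred : List Int) (threshold : Int) (out : Int × Int × Int × Int) : Decidable (Spec_perf_measure y_true y_pred threshold out) := by unfold Spec_perf_measure; infer_instance

-- ===== CLAIM (what is proved, stated in full; the proofs are below) =====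
def Claim_equal_perf_measure : Prop := ∀ (y_true : List Int) (y_pred : List Int) (threshold : Int), Dom_perf_measure y_true y_pred threshold → Pre_perf_measure y_true y_pred threshold → Spec_perf_measure y_true y_pred threshold (perf_measure y_true y_pred threshold)

-- ===== LEMMAS AND PROOFS =====

-- the pair each index is classified by
def pvKey (y_true : List Int) (y_pred : List Int) (i : Int) : Int × Int :=
  (PySem.List.pyGetD y_true i 0, PySem.List.pyGetD y_pred i 0)

-- each step of A adds 1 to exactly the component selected by the (true, pred) pair
theorem stepA_eq (y_true y_pred : List Int) (st : Int × Int × Int × Int) (i : Int) :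
    pvStepA y_true y_pred st i =
      (st.1 + (if pvKey y_true y_pred i = (1, 1) then 1 else 0),
       st.2.1 + (if pvKey y_true y_pred i = (0, 1) then 1 else 0),
       st.2.2.1 + (if pvKey y_true y_pred i = (0, 0) then 1 else 0),
       st.2.2.2 + (if pvKey y_true y_pred i = (1, 0) then 1 else 0)) := by
  obtain ⟨tp, fp, tn, fn⟩ := st
  simp only [pvStepA, pvKey, Prod.mk.injEq]
  split_ifs with h1 h2 h3 h4 h2 h3 h4 h3 h4 h4 <;> simp_all

-- A's fold computes, in each component, the count of the corresponding key among the pairs.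
theorem foldA_counts (y_true y_pred : List Int) (l : List Int) (tp fp tn fn : Int) :
    l.foldl (pvStepA y_true y_pred) (tp, fp, tn, fn) =
      (tp + ((l.map (pvKey y_true y_pred)).count (1, 1) : Int),
       fp + ((l.map (pvKey y_true y_pred)).count (0, 1) : Int),
       tn + ((l.map (pvKey y_true y_pred)).count (0, 0) : Int),
       fn + ((l.map (pvKey y_true y_pred)).count (1, 0) : Int)) := by
  induction l generalizing tp fp tn fn with
  | nil => simp
  | cons i l ih =>
      rw [List.foldl_cons, stepA_eq, ih]
      simp only [List.map_cons, List.count_cons, Prod.mk.injEq, beq_iff_eq]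
      refine ⟨?_, ?_, ?_, ?_⟩ <;> split_ifs with h <;> simp_all <;> omega

-- ===== VERDICT (by name: the statement is the Claim_ definition above) =====
theorem perf_measure_spec : Claim_equal_perf_measure := by
  intro y_true y_pred threshold _ _
  unfold Spec_perf_measure perf_measure perf_measure_alt
  rw [foldA_counts]
  simp only [PySem.List.count_eq, zero_add]
  rfl
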